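-- pv_equiv track=rewrite | github.com/Inkflow59/PyWordExplorer | src/grid_generator.py | _can_place_word
-- ===== SOURCE A (Python) =====
-- from typing import List, Tuple, Dict
--
-- def _can_place_word(grid: List[List[str]], word: str, row: int, col: int,
--                    direction: Tuple[int, int], grid_size: int) -> bool:
--     """Vérifie si un mot peut être placé à une position donnée."""
--     dr, dc = direction
--
--     for i, letter in enumerate(word):
--         new_row = row + i * dr
--         new_col = col + i * dc
--
--         # Vérifier les limites
--         if not (0 <= new_row < grid_size and 0 <= new_col < grid_size):
--             return False
--
--         # Vérifier si la case est vide ou contient la même lettre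
--         current = grid[new_row][new_col]
--         if current != ' ' and current != letter:
--             return False
--
--     return True
-- ===== SOURCE B (Python) =====
-- def _can_place_word(grid, word, row, col, direction, grid_size):
--     dr, dc = direction
--     # Stage 1: walk the line with incrementally updated coordinates, collecting
--     # the grid cells the word would cover; stop as soon as the walk leaves the grid.
--     cells = []
--     r, c = row, col
--     for _ in word:
--         if not (0 <= r < grid_size and 0 <= c < grid_size):
--             return False
--         cells.append(grid[r][c])
--         r += dr
--         c += dc
--     # Stage 2: compare the collected cells with the word's letters.
--     return all(cur == ' ' or cur == letter for cur, letter in zip(cells, word))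
-- ===== Notes on version B (the rewrite author's own statement) =====
-- stated objective: alternative
-- what changed: B splits A's single fused loop into two staged passes: a walk with incrementally updated coordinates (no i*dr multiplication) that collects the covered cells and bails out on the first out-of-bounds step, followed by a separate zip pass comparing the collected cells with the word's letters.
-- outside the precondition, e.g. on _can_place_word([['b']], 'ab', 0, 0, (0, 1), 2): A returns False, B raises IndexError
import Mathlib
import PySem

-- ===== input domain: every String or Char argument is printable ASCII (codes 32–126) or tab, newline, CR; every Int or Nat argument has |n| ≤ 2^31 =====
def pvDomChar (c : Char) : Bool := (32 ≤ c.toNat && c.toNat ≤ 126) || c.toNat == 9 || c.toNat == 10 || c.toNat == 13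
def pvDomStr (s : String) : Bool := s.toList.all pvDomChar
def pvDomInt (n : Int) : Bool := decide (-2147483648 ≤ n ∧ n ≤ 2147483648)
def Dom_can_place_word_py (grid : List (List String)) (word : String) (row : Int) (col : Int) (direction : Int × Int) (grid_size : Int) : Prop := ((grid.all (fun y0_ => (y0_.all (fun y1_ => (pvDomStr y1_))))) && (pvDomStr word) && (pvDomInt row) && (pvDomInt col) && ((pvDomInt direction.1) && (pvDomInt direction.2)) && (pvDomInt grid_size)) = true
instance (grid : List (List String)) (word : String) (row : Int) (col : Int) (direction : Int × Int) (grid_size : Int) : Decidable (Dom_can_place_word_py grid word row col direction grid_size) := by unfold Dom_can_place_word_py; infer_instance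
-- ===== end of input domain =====

-- B replaces A's single fused loop (index-multiplied positions, bounds+content checked
-- together per cell) by two staged passes: an incremental walk that collects the covered
-- cells, then a zip pass comparing cells with letters (objective: alternative, same cost).

-- ===== PORT A =====
-- grid[nr][nc]; the default is only reached where Python raises IndexError (outside Pre_)
def pvCell (grid : List (List String)) (nr nc : Int) : String :=
  PySem.List.pyGetD (PySem.List.pyGetD grid nr []) nc ""

def pvAloop (grid : List (List String)) (row col dr dc gs : Int) : List (Int × Char) → Bool
  | [] => true
  | (i, letter) :: rest =>
    let new_row := row + i * dr
    let new_col := col + i * dc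
    if !(decide (0 ≤ new_row) && decide (new_row < gs) && decide (0 ≤ new_col) && decide (new_col < gs)) then
      false
    else
      let current := pvCell grid new_row new_col
      if current != " " && current != String.ofList [letter] then false
      else pvAloop grid row col dr dc gs rest

def can_place_word_py (grid : List (List String)) (word : String) (row : Int) (col : Int) (direction : Int × Int) (grid_size : Int) : Bool :=
  pvAloop grid row col direction.1 direction.2 grid_size (PySem.List.enumerate word.toList 0)

-- ===== PORT B =====
-- Python's '0 <= r < grid_size and 0 <= c < grid_size'
def pvInB (gs r c : Int) : Bool := decide (0 ≤ r) && decide (r < gs) && decide (0 ≤ c) && decide (c < gs)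

-- Stage 1 of B: walk the line collecting cells; 'none' = the early 'return False'
def pvGather (grid : List (List String)) (gs : Int) : Int → Int → Int → Int → List Char → Option (List String)
  | _, _, _, _, [] => some []
  | r, c, dr, dc, _ :: rest =>
    if pvInB gs r c then
      (pvGather grid gs (r + dr) (c + dc) dr dc rest).map (fun cells => pvCell grid r c :: cells)
    else none

def can_place_word_py_alt (grid : List (List String)) (word : String) (row : Int) (col : Int) (direction : Int × Int) (grid_size : Int) : Bool :=
  match pvGather grid grid_size row col direction.1 direction.2 word.toList with
  | none => false
  | some cells =>
      (cells.zip word.toList).all (fun p => p.1 == " " || p.1 == String.ofList [p.2])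

-- ===== PRECONDITION & SPEC =====
-- Pre_ requires every cell of the word's line whose indices pass the 0 ≤ · < grid_size test
-- to actually exist in the grid; on grids smaller than grid_size the programs can raise
-- IndexError on a bounds-approved cell.  This also excludes a few such grids on which A
-- happens to return (an earlier letter already mismatches, while B's gather pass still
-- touches the missing cell) — see the cite in claim.json.
def Pre_can_place_word_py (grid : List (List String)) (word : String) (row : Int) (col : Int) (direction : Int × Int) (grid_size : Int) : Prop :=
  ∀ i ∈ List.range word.toList.length,
    (0 ≤ row + (i : Int) * direction.1 ∧ row + (i : Int) * direction.1 < grid_size ∧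
     0 ≤ col + (i : Int) * direction.2 ∧ col + (i : Int) * direction.2 < grid_size) →
      ((row + (i : Int) * direction.1).toNat < grid.length ∧
       (col + (i : Int) * direction.2).toNat < (grid.getD (row + (i : Int) * direction.1).toNat []).length)
instance (grid : List (List String)) (word : String) (row : Int) (col : Int) (direction : Int × Int) (grid_size : Int) : Decidable (Pre_can_place_word_py grid word row col direction grid_size) := by unfold Pre_can_place_word_py; infer_instance

def pvWitness_can_place_word_py : List (List String) × String × Int × Int × (Int × Int) × Int :=
  ([[" ", "a"], ["b", " "]], "ab", 0, 0, (1, 1), 2)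

def Spec_can_place_word_py (grid : List (List String)) (word : String) (row : Int) (col : Int) (direction : Int × Int) (grid_size : Int) (out : Bool) : Prop := out = can_place_word_py_alt grid word row col direction grid_size
instance (grid : List (List String)) (word : String) (row : Int) (col : Int) (direction : Int × Int) (grid_size : Int) (out : Bool) : Decidable (Spec_can_place_word_py grid word row col direction grid_size out) := by unfold Spec_can_place_word_py; infer_instance

-- ===== CLAIM =====
def Claim_equal_can_place_word_py : Prop := ∀ (grid : List (List String)) (word : String) (row : Int) (col : Int) (direction : Int × Int) (grid_size : Int), Dom_can_place_word_py grid word row col direction grid_size → Pre_can_place_word_py grid word row col direction grid_size → Spec_can_place_word_py grid word row col direction grid_size (can_place_word_py grid word row col direction grid_size)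

-- ===== LEMMAS AND PROOFS =====

-- A's fused loop over enumerated letters equals B's gather-then-zip decomposition,
-- for a walk starting s steps into the line.
theorem pv_walk (grid : List (List String)) (row col dr dc gs : Int) (xs : List Char) :
    ∀ (s : Int),
    pvAloop grid row col dr dc gs (PySem.List.enumerate xs s)
      = match pvGather grid gs (row + s * dr) (col + s * dc) dr dc xs with
        | none => false
        | some cells =>
            (cells.zip xs).all (fun p => p.1 == " " || p.1 == String.ofList [p.2]) := by
  induction xs with
  | nil => intro s; rfl
  | cons a l ih =>
    intro s
    rw [PySem.List.enumerate_cons]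
    simp only [pvAloop, pvGather]
    by_cases hb : pvInB gs (row + s * dr) (col + s * dc) = true
    · have hb' : (decide (0 ≤ row + s * dr) && decide (row + s * dr < gs) &&
          decide (0 ≤ col + s * dc) && decide (col + s * dc < gs)) = true := hb
      simp only [hb, hb', if_true, Bool.not_true, Bool.false_eq_true, if_false]
      have hrow : row + (s + 1) * dr = (row + s * dr) + dr := by ring
      have hcol : col + (s + 1) * dc = (col + s * dc) + dc := by ring
      have ih' := ih (s + 1)
      rw [hrow, hcol] at ih'
      cases hg : pvGather grid gs (row + s * dr + dr) (col + s * dc + dc) dr dc l with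
      | none =>
        rw [hg] at ih'
        simp only [Option.map_none]
        split <;> simp [ih']
      | some cells =>
        rw [hg] at ih'
        simp only [Option.map_some, List.zip_cons_cons, List.all_cons, ih']
        by_cases c1 : pvCell grid (row + s * dr) (col + s * dc) = " " <;>
          by_cases c2 : pvCell grid (row + s * dr) (col + s * dc) = String.ofList [a] <;>
            simp [c1, c2, bne]
    · have hb' : (decide (0 ≤ row + s * dr) && decide (row + s * dr < gs) &&
          decide (0 ≤ col + s * dc) && decide (col + s * dc < gs)) = false := by
        simpa [pvInB] using hb
      simp [hb, hb']

-- ===== VERDICT =====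
theorem can_place_word_py_spec : Claim_equal_can_place_word_py := by
  intro grid word row col direction grid_size _ _
  unfold Spec_can_place_word_py can_place_word_py can_place_word_py_alt
  rw [pv_walk grid row col direction.1 direction.2 grid_size word.toList 0]
  simp
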